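-- pv_equiv track=rewrite | github.com/Carolyn95/data-augmentation | save_balanced_data.py | getIndexed
-- ===== SOURCE A (Python) =====
-- def getIndexed(labels, count):
--   #   count = 520
--   needed_idx = []
--   for idx, v in enumerate(labels):
--     if v != 1:
--       needed_idx.append(idx)
--     else:
--       if count > 0:
--         needed_idx.append(idx)
--         count -= 1
--   return needed_idx
-- ===== SOURCE B (Python) =====
-- def getIndexed(labels, count):
--     return [idx for idx, v in enumerate(labels)
--             if v != 1 or labels[:idx].count(1) < count]
-- ===== Notes on version B (the rewrite author's own statement) =====
-- stated objective: alternative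
-- what changed: B is a stateless filter comprehension: an index is kept iff its label is not 1 or the number of 1-labels strictly before it is below count, instead of A's imperative loop with a mutable countdown.
import Mathlib
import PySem

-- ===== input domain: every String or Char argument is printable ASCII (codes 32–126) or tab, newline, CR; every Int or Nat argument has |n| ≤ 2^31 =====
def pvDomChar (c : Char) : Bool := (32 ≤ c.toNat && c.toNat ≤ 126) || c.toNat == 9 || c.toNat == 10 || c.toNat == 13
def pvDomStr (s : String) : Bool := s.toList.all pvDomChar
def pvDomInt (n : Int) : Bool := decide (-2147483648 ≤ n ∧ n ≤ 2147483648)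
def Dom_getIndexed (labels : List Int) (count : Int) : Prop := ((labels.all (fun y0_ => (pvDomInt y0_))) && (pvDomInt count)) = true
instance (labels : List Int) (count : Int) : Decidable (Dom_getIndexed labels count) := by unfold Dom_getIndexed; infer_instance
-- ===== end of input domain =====

-- B replaces A's imperative countdown loop by a stateless filter over enumerated indices (keep idx iff label ≠ 1 or the number of 1-labels before idx is below count); alternative decomposition, same results.


-- ===== PORT A =====
-- A: one loop over enumerate(labels); append idx when v != 1, else append and decrement while count > 0.
def getIndexed (labels : List Int) (count : Int) : List Int :=
  ((PySem.List.enumerate labels 0).foldl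
      (fun (st : List Int × Int) p =>
        if p.2 ≠ 1 then (st.1 ++ [p.1], st.2)
        else if st.2 > 0 then (st.1 ++ [p.1], st.2 - 1)
        else st)
      ([], count)).1

-- ===== PORT B =====
-- B: filter comprehension; keep idx iff v != 1 or labels[:idx].count(1) < count.
def getIndexed_alt (labels : List Int) (count : Int) : List Int :=
  ((PySem.List.enumerate labels 0).filter
      (fun p => p.2 != 1 ||
        decide (((PySem.List.slice labels none (some p.1)).count 1 : Int) < count))).map (·.1)

-- ===== PRECONDITION & SPEC =====
def Spec_getIndexed (labels : List Int) (count : Int) (out : List Int) : Prop := out = getIndexed_alt labels count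
instance (labels : List Int) (count : Int) (out : List Int) : Decidable (Spec_getIndexed labels count out) := by unfold Spec_getIndexed; infer_instance

-- ===== CLAIM (what is proved, stated in full; the proofs are below) =====
def Claim_equal_getIndexed : Prop := ∀ (labels : List Int) (count : Int), Dom_getIndexed labels count → Spec_getIndexed labels count (getIndexed labels count)

-- ===== LEMMAS AND PROOFS =====

-- canonical selection: ascending indices, all non-1 plus the first (count) label-1 indices
def gsel : List Int → Int → Int → List Int
  | [], _, _ => []
  | v :: rest, i, c =>
    if v ≠ 1 then i :: gsel rest (i + 1) c
    else if c > 0 then i :: gsel rest (i + 1) (c - 1)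
    else gsel rest (i + 1) c

theorem foldlA_spec (labels : List Int) (i c : Int) (acc : List Int) :
    ((PySem.List.enumerate labels i).foldl
      (fun (st : List Int × Int) p =>
        if p.2 ≠ 1 then (st.1 ++ [p.1], st.2)
        else if st.2 > 0 then (st.1 ++ [p.1], st.2 - 1)
        else st)
      (acc, c)).1 = acc ++ gsel labels i c := by
  induction labels generalizing i c acc with
  | nil => simp [PySem.List.enumerate_nil, gsel]
  | cons v rest ih =>
    rw [PySem.List.enumerate_cons]
    simp only [List.foldl_cons, gsel]
    by_cases h1 : v ≠ 1
    · rw [if_pos h1, if_pos h1, ih]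
      simp
    · rw [if_neg h1]
      by_cases h2 : c > 0
      · rw [if_pos h2, if_neg h1, if_pos h2, ih]
        simp
      · rw [if_neg h2, if_neg h1, if_neg h2, ih]

theorem filterB_spec (count : Int) : ∀ (suf pre : List Int) (c : Int),
    c = count - min ((pre.count 1 : Int)) (max count 0) →
    ((PySem.List.enumerate suf (pre.length : Int)).filter
        (fun p => p.2 != 1 ||
          decide (((PySem.List.slice (pre ++ suf) none (some p.1)).count 1 : Int) < count))).map (·.1)
      = gsel suf (pre.length : Int) c := by
  intro suf
  induction suf with
  | nil => intro pre c _; simp [PySem.List.enumerate_nil, gsel]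
  | cons v rest ih =>
    intro pre c hc
    rw [PySem.List.enumerate_cons]
    have hslice : PySem.List.slice (pre ++ v :: rest) none (some (pre.length : Int)) = pre := by
      rw [PySem.List.slice_to_natCast, List.take_left]
    have hlen : ∀ w : Int, ((pre ++ [w]).length : Int) = (pre.length : Int) + 1 := by
      intro w; simp
    have happ : ∀ w : Int, (pre ++ [w]) ++ rest = pre ++ w :: rest := by intro w; simp
    have ho : (0 : Int) ≤ (pre.count 1 : Int) := by positivity
    simp only [List.filter_cons, gsel]
    by_cases hv : v = 1
    · subst hv
      have hcnt : ((pre ++ [1]).count 1 : Int) = (pre.count 1 : Int) + 1 := by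
        simp
      have hpred : ((1 : Int) != 1 ||
          decide (((PySem.List.slice (pre ++ 1 :: rest) none (some ((pre.length : Int)))).count 1 : Int) < count))
          = decide ((pre.count 1 : Int) < count) := by
        rw [hslice]; simp
      rw [hpred]
      by_cases h2 : c > 0
      · have hstep := ih (pre ++ [1]) (c - 1) (by rw [hcnt]; omega)
        rw [hlen, happ] at hstep
        have hlt : (pre.count 1 : Int) < count := by omega
        rw [if_pos (by simpa using hlt), if_neg (by simp), if_pos h2, List.map_cons, hstep]
      · have hstep := ih (pre ++ [1]) c (by rw [hcnt]; omega)
        rw [hlen, happ] at hstep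
        have hge : ¬ (pre.count 1 : Int) < count := by omega
        rw [if_neg (by simpa using hge), if_neg (by simp), if_neg h2]
        exact hstep
    · have hcnt : ((pre ++ [v]).count 1 : Int) = (pre.count 1 : Int) := by
        simp [hv]
      have hstep := ih (pre ++ [v]) c (by rw [hcnt]; exact hc)
      rw [hlen, happ] at hstep
      have hpred : (v != 1 ||
          decide (((PySem.List.slice (pre ++ v :: rest) none (some ((pre.length : Int)))).count 1 : Int) < count))
          = true := by simp [hv]
      rw [hpred, if_pos rfl, if_pos hv, List.map_cons, hstep]

-- ===== VERDICT (by name: the statement is the Claim_ definition above) =====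
theorem getIndexed_spec : Claim_equal_getIndexed := by
  intro labels count _
  unfold Spec_getIndexed getIndexed getIndexed_alt
  rw [foldlA_spec, List.nil_append]
  have := filterB_spec count labels [] count (by simp)
  simpa using this.symm
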